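-- pv_equiv track=rewrite | github.com/tartopum/atelier | atelier/tank.py | _bin_time_series
-- ===== SOURCE A (Python) =====
-- from collections import defaultdict
--
-- def _bin_time_series(dates, data, binsize, start_date=None):
--     if start_date is None:
--         start_date = dates[0]
--     binned_data = defaultdict(list)
--     for date, val in zip(dates, data):
--         bin_index = abs(date - start_date) // binsize
--         binned_data[start_date + bin_index * binsize].append(val)
--     binned_dates = sorted(binned_data)
--     return binned_dates, [binned_data[d] for d in binned_dates]
-- ===== SOURCE B (Python) =====
-- def _bin_time_series(dates, data, binsize, start_date=None):
--     if start_date is None: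
--         start_date = dates[0]
--     pairs = sorted(
--         ((start_date + (abs(d - start_date) // binsize) * binsize, v)
--          for d, v in zip(dates, data)),
--         key=lambda p: p[0])
--     bins, cols = [], []
--     for k, v in pairs:
--         if bins and bins[-1] == k:
--             cols[-1].append(v)
--         else:
--             bins.append(k)
--             cols.append([v])
--     return bins, cols
-- ===== Notes on version B (the rewrite author's own statement) =====
-- stated objective: alternative
-- what changed: Replaces A's defaultdict grouping plus key-sort-and-lookup with a sort-then-group sweep: key every (date,value) pair, stably sort the pairs by key, then one linear pass that emits a new bin whenever the key changes.
import Mathlib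
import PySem

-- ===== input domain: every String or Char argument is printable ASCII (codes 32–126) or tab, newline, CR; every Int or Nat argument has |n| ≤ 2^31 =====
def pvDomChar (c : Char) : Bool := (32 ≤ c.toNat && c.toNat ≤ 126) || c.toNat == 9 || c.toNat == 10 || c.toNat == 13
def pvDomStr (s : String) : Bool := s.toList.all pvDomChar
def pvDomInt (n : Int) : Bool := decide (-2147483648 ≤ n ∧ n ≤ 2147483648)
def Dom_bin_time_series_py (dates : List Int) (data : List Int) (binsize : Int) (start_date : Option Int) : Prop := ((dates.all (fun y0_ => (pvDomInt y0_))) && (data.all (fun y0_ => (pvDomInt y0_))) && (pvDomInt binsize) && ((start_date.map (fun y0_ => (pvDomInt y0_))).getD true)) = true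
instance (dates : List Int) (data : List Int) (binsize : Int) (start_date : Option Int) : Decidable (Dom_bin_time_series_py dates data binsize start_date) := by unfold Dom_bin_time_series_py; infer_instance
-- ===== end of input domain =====

-- B replaces A's defaultdict grouping by a sort-then-group sweep: key every pair, stably sort
-- the pairs by key, then one pass emitting a bin per run of equal keys (objective: alternative).

-- ===== PORT A =====
-- A: defaultdict(list) filled in one loop over zip(dates, data); bins = sorted dict keys;
-- values looked up per sorted key.
def bin_time_series_py (dates : List Int) (data : List Int) (binsize : Int) (start_date : Option Int) : List Int × List (List Int) :=
  let start : Int := start_date.getD ((PySem.List.pyGet? dates 0).getD 0)  -- dates[0]; none (IndexError) excluded by Pre_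
  let binned_data : PySem.Dict Int (List Int) :=
    (dates.zip data).foldl
      (fun d p =>
        d.modify (start + (PySem.Int.floordiv |p.1 - start| binsize) * binsize) [] (fun l => l ++ [p.2]))
      PySem.Dict.empty
  let binned_dates := PySem.List.sorted binned_data.keys (fun x => x) false
  (binned_dates, binned_dates.map (fun k => binned_data.getD k []))

-- ===== PORT B =====
-- one grouping step of Source B's sweep: 'if bins and bins[-1] == k: cols[-1].append(v) else: new bin'
def pvGroupStep (acc : List Int × List (List Int)) (p : Int × Int) : List Int × List (List Int) :=
  if acc.1 ≠ [] ∧ (PySem.List.pyGet? acc.1 (-1)).getD 0 = p.1 then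
    (acc.1, acc.2.dropLast ++ [acc.2.getLast?.getD [] ++ [p.2]])
  else
    (acc.1 ++ [p.1], acc.2 ++ [[p.2]])

def bin_time_series_py_alt (dates : List Int) (data : List Int) (binsize : Int) (start_date : Option Int) : List Int × List (List Int) :=
  let start : Int := start_date.getD ((PySem.List.pyGet? dates 0).getD 0)
  let pairs : List (Int × Int) :=
    PySem.List.sorted
      ((dates.zip data).map
        (fun p => (start + (PySem.Int.floordiv |p.1 - start| binsize) * binsize, p.2)))
      (fun p => p.1) false
  pairs.foldl pvGroupStep ([], [])

-- ===== PRECONDITION & SPEC =====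
-- Pre_ excludes exactly where A raises: binsize = 0 (ZeroDivisionError in '//') and
-- start_date = None with empty dates (IndexError on dates[0]).
def Pre_bin_time_series_py (dates : List Int) (data : List Int) (binsize : Int) (start_date : Option Int) : Prop :=
  binsize ≠ 0 ∧ (start_date = none → dates ≠ [])
instance (dates : List Int) (data : List Int) (binsize : Int) (start_date : Option Int) : Decidable (Pre_bin_time_series_py dates data binsize start_date) := by unfold Pre_bin_time_series_py; infer_instance

def pvWitness_bin_time_series_py : List Int × List Int × Int × Option Int := ([1, 3, 9, 2], [10, 20, 30, 40], 4, none)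

def Spec_bin_time_series_py (dates : List Int) (data : List Int) (binsize : Int) (start_date : Option Int) (out : List Int × List (List Int)) : Prop := out = bin_time_series_py_alt dates data binsize start_date
instance (dates : List Int) (data : List Int) (binsize : Int) (start_date : Option Int) (out : List Int × List (List Int)) : Decidable (Spec_bin_time_series_py dates data binsize start_date out) := by unfold Spec_bin_time_series_py; infer_instance

-- ===== CLAIM (what is proved, stated in full; the proofs are below) =====
def Claim_equal_bin_time_series_py : Prop := ∀ (dates : List Int) (data : List Int) (binsize : Int) (start_date : Option Int), Dom_bin_time_series_py dates data binsize start_date → Pre_bin_time_series_py dates data binsize start_date → Spec_bin_time_series_py dates data binsize start_date (bin_time_series_py dates data binsize start_date)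

-- ===== LEMMAS AND PROOFS =====

theorem pv_pyGet_neg_one (l : List Int) (hl : l ≠ []) :
    PySem.List.pyGet? l (-1) = l.getLast? := by
  have h : 0 < l.length := List.length_pos_iff.mpr hl
  simp only [PySem.List.pyGet?, PySem.List.pyIdx?]
  rw [if_neg (by omega), if_pos (by omega : -(l.length : Int) ≤ -1)]
  have : (- -1 : Int).toNat = 1 := rfl
  rw [this, Option.bind_some, List.getLast?_eq_getElem?]

theorem pv_ofList_sublist (xs : List Int) : (PySem.Set.ofList xs).Sublist xs := by
  induction xs using List.reverseRecOn with
  | nil => simp [PySem.Set.ofList]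
  | append_singleton xs x ih =>
    rw [PySem.Set.ofList_append_singleton, PySem.Set.add_eq_ite]
    split
    · exact ih.trans (List.sublist_append_left xs [x])
    · exact List.Sublist.append ih (List.Sublist.refl [x])

theorem pv_getLast_of_max (K : List Int) (x : Int) (hK : K.Pairwise (· < ·))
    (hx : x ∈ K) (hmax : ∀ k ∈ K, k ≤ x) : K.getLast? = some x := by
  induction K with
  | nil => cases hx
  | cons a t ih =>
    rcases List.pairwise_cons.mp hK with ⟨ha, ht⟩
    cases t with
    | nil => simp at hx ⊢; omega
    | cons b u =>
      have hmem : x ∈ b :: u := by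
        rcases List.mem_cons.mp hx with rfl | h
        · exfalso
          have h1 := ha b (by simp)
          have h2 := hmax b (by simp)
          omega
        · exact h
      rw [List.getLast?_cons_cons]
      exact ih ht hmem (fun k hk => hmax k (List.mem_cons_of_mem _ hk))

theorem pv_filter_insertBy (x : Int × Int) (k : Int) (ys : List (Int × Int))
    (hys : ys.Pairwise (fun a b => a.1 ≤ b.1)) :
    (PySem.List.insertBy (fun a b => decide (a.1 < b.1)) x ys).filter (fun p => p.1 == k)
      = if x.1 = k then ys.filter (fun p => p.1 == k) ++ [x]
        else ys.filter (fun p => p.1 == k) := by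
  induction ys with
  | nil =>
    simp only [PySem.List.insertBy]
    split_ifs with h <;> simp [h]
  | cons y t ih =>
    rcases List.pairwise_cons.mp hys with ⟨hy, ht⟩
    by_cases hlt : x.1 < y.1
    · simp only [PySem.List.insertBy, hlt, decide_true, if_true]
      by_cases hk : x.1 = k
      · have hfil : ((y :: t).filter (fun p => p.1 == k)) = [] := by
          rw [List.filter_eq_nil_iff]
          intro p hp
          have hyp : y.1 ≤ p.1 := by
            rcases List.mem_cons.mp hp with rfl | hpt
            · exact le_refl _
            · exact hy p hpt
          simp only [beq_iff_eq]
          omega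
        rw [List.filter_cons]
        simp [hfil, hk]
      · rw [List.filter_cons]
        simp [hk]
    · simp only [PySem.List.insertBy, hlt, decide_false, Bool.false_eq_true, if_false]
      rw [List.filter_cons, ih ht]
      by_cases hk : x.1 = k <;> by_cases hyk : y.1 = k <;> simp [hk, hyk]

theorem pv_filter_sorted (xs : List (Int × Int)) (k : Int) :
    (PySem.List.sorted xs (fun p => p.1) false).filter (fun p => p.1 == k)
      = xs.filter (fun p => p.1 == k) := by
  induction xs using List.reverseRecOn with
  | nil => simp [PySem.List.sorted]
  | append_singleton xs x ih =>
    rw [PySem.List.sorted_eq_foldl_insertBy, List.foldl_append,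
        ← PySem.List.sorted_eq_foldl_insertBy]
    simp only [List.foldl_cons, List.foldl_nil]
    rw [pv_filter_insertBy x k _ (PySem.List.sorted_pairwise xs (fun p => p.1)), ih]
    rw [List.filter_append, List.filter_cons]
    split_ifs with h h2 h2 <;> simp_all

theorem pv_group_spec (s : List (Int × Int)) (hs : s.Pairwise (fun a b => a.1 ≤ b.1)) :
    s.foldl pvGroupStep ([], [])
      = (PySem.Set.ofList (s.map Prod.fst),
         (PySem.Set.ofList (s.map Prod.fst)).map
           (fun k => (s.filter (fun p => p.1 == k)).map Prod.snd)) := by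
  induction s using List.reverseRecOn with
  | nil => simp [PySem.Set.ofList]
  | append_singleton s p ih =>
    have hsp : s.Pairwise (fun a b => a.1 ≤ b.1) :=
      hs.sublist (List.sublist_append_left s [p])
    have hle : ∀ q ∈ s, q.1 ≤ p.1 := by
      intro q hq
      exact (List.pairwise_append.mp hs).2.2 q hq p (by simp)
    rw [List.foldl_append, List.foldl_cons, List.foldl_nil, ih hsp]
    have hKsub : (PySem.Set.ofList (s.map Prod.fst)).Sublist (s.map Prod.fst) :=
      pv_ofList_sublist _
    have hKlt : (PySem.Set.ofList (s.map Prod.fst)).Pairwise (· < ·) := by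
      have h1 : (PySem.Set.ofList (s.map Prod.fst)).Pairwise (· ≤ ·) :=
        (List.pairwise_map.mpr hsp).sublist hKsub
      have h2 : (PySem.Set.ofList (s.map Prod.fst)).Nodup := PySem.Set.nodup_ofList _
      exact (h1.and h2).imp (fun h => lt_of_le_of_ne h.1 h.2)
    have hmaxK : ∀ k ∈ PySem.Set.ofList (s.map Prod.fst), k ≤ p.1 := by
      intro k hk
      obtain ⟨q, hq, rfl⟩ := List.mem_map.mp ((PySem.Set.mem_ofList _ _).mp hk)
      exact hle q hq
    have hfne : ∀ k : Int, p.1 ≠ k →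
        ((s ++ [p]).filter (fun q => q.1 == k)) = s.filter (fun q => q.1 == k) := by
      intro k hk
      simp [List.filter_append, hk]
    have hfp : (s ++ [p]).filter (fun q => q.1 == p.1)
        = s.filter (fun q => q.1 == p.1) ++ [p] := by
      simp [List.filter_append]
    by_cases hmem : p.1 ∈ s.map Prod.fst
    · have hKmem : p.1 ∈ PySem.Set.ofList (s.map Prod.fst) := (PySem.Set.mem_ofList _ _).mpr hmem
      have hKne : PySem.Set.ofList (s.map Prod.fst) ≠ [] := List.ne_nil_of_mem hKmem
      have hlast : (PySem.Set.ofList (s.map Prod.fst)).getLast? = some p.1 :=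
        pv_getLast_of_max _ p.1 hKlt hKmem hmaxK
      have hKeq : (PySem.Set.ofList (s.map Prod.fst)).dropLast ++ [p.1]
          = PySem.Set.ofList (s.map Prod.fst) := by
        have hg : (PySem.Set.ofList (s.map Prod.fst)).getLast hKne = p.1 := by
          rw [List.getLast?_eq_some_getLast hKne, Option.some_inj] at hlast
          exact hlast
        rw [← hg]
        exact List.dropLast_concat_getLast hKne
      have hKeys : PySem.Set.ofList ((s ++ [p]).map Prod.fst)
          = PySem.Set.ofList (s.map Prod.fst) := by
        rw [List.map_append, List.map_cons, List.map_nil,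
            PySem.Set.ofList_append_singleton, PySem.Set.add_of_mem hKmem]
      obtain ⟨D, hD⟩ : ∃ D, PySem.Set.ofList (s.map Prod.fst) = D ++ [p.1] :=
        ⟨(PySem.Set.ofList (s.map Prod.fst)).dropLast, hKeq.symm⟩
      have hDlt : ∀ k ∈ D, k < p.1 := by
        rw [hD] at hKlt
        exact fun k hk => (List.pairwise_append.mp hKlt).2.2 k hk p.1 (by simp)
      unfold pvGroupStep
      rw [if_pos ⟨hKne, by rw [pv_pyGet_neg_one _ hKne, hlast]; rfl⟩]
      refine Prod.ext hKeys.symm ?_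
      rw [hKeys]
      simp only [hD, List.map_append, List.map_cons, List.map_nil,
        List.dropLast_concat, List.getLast?_concat, Option.getD_some]
      have h1 : D.map (fun k => (s.filter (fun q => q.1 == k)).map Prod.snd)
          = D.map (fun k => ((s ++ [p]).filter (fun q => q.1 == k)).map Prod.snd) :=
        List.map_congr_left (fun k hk => by rw [hfne k (hDlt k hk).ne'])
      have h2 : ((s ++ [p]).filter (fun q => q.1 == p.1)).map Prod.snd
          = (s.filter (fun q => q.1 == p.1)).map Prod.snd ++ [p.2] := by
        rw [hfp]; simp
      rw [h1, h2]
    · have hnotmem : p.1 ∉ PySem.Set.ofList (s.map Prod.fst) :=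
        fun h => hmem ((PySem.Set.mem_ofList _ _).mp h)
      have hcond : ¬ (PySem.Set.ofList (s.map Prod.fst) ≠ [] ∧
          (PySem.List.pyGet? (PySem.Set.ofList (s.map Prod.fst)) (-1)).getD 0 = p.1) := by
        rintro ⟨hne, heq⟩
        rw [pv_pyGet_neg_one _ hne, List.getLast?_eq_some_getLast hne, Option.getD_some] at heq
        exact hnotmem (heq ▸ List.getLast_mem hne)
      unfold pvGroupStep
      rw [if_neg hcond]
      have hKeys : PySem.Set.ofList ((s ++ [p]).map Prod.fst)
          = PySem.Set.ofList (s.map Prod.fst) ++ [p.1] := by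
        rw [List.map_append, List.map_cons, List.map_nil,
            PySem.Set.ofList_append_singleton, PySem.Set.add_of_not_mem hnotmem]
      refine Prod.ext hKeys.symm ?_
      rw [hKeys]
      simp only [List.map_append, List.map_cons, List.map_nil]
      have h1 : (PySem.Set.ofList (s.map Prod.fst)).map
            (fun k => (s.filter (fun q => q.1 == k)).map Prod.snd)
          = (PySem.Set.ofList (s.map Prod.fst)).map
            (fun k => ((s ++ [p]).filter (fun q => q.1 == k)).map Prod.snd) :=
        List.map_congr_left (fun k hk => by
          rw [hfne k (fun h => hnotmem (h ▸ hk))])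
      have hnil : s.filter (fun q => q.1 == p.1) = [] := by
        rw [List.filter_eq_nil_iff]
        intro q hq
        simp only [beq_iff_eq]
        intro h
        exact hmem (h ▸ List.mem_map_of_mem hq)
      have h2 : ((s ++ [p]).filter (fun q => q.1 == p.1)).map Prod.snd = [p.2] := by
        rw [hfp, hnil]; simp
      rw [h1, h2]

-- keys of A's defaultdict loop = the distinct keys in first-occurrence order
theorem pv_keys_eq (k : Int → Int) (l : List (Int × Int)) :
    (l.foldl (fun d p => d.modify (k p.1) [] (fun s => s ++ [p.2])) (PySem.Dict.empty : PySem.Dict Int (List Int))).keys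
      = PySem.Set.ofList (l.map (fun p => k p.1)) := by
  rw [PySem.Dict.keys_foldl_modify_key l (fun p => k p.1) [] (fun _ p => fun s => s ++ [p.2])]
  simp [PySem.Set.update, PySem.Set.ofList, PySem.Dict.keys_empty]

-- each bin of A's dict = a filter pass over the keyed pairs
theorem pv_getD_eq (k : Int → Int) (l : List (Int × Int)) (c : Int) :
    (l.foldl (fun d p => d.modify (k p.1) [] (fun s => s ++ [p.2])) (PySem.Dict.empty : PySem.Dict Int (List Int))).getD c []
      = ((l.map (fun p => (k p.1, p.2))).filter (fun p => p.1 == c)).map Prod.snd := by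
  rw [← List.foldl_map (f := fun p : Int × Int => (k p.1, p.2))
        (g := fun (d : PySem.Dict Int (List Int)) (p : Int × Int) => d.modify p.1 [] (fun s => s ++ [p.2]))]
  rw [PySem.Dict.getD_foldl_modify_append]
  simp [PySem.Dict.getD_empty]

-- main bridge: A's (sorted keys, lookups) = B's (group sweep over the stably sorted pairs)
theorem pv_main (K : Int → Int) (l : List (Int × Int)) :
    ((PySem.List.sorted (l.foldl (fun d p => d.modify (K p.1) [] (fun s => s ++ [p.2])) (PySem.Dict.empty : PySem.Dict Int (List Int))).keys (fun x => x) false),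
      (PySem.List.sorted (l.foldl (fun d p => d.modify (K p.1) [] (fun s => s ++ [p.2])) (PySem.Dict.empty : PySem.Dict Int (List Int))).keys (fun x => x) false).map
        (fun k => (l.foldl (fun d p => d.modify (K p.1) [] (fun s => s ++ [p.2])) (PySem.Dict.empty : PySem.Dict Int (List Int))).getD k []))
    = (PySem.List.sorted (l.map (fun p => (K p.1, p.2))) (fun p => p.1) false).foldl pvGroupStep ([], []) := by
  have hpair : (PySem.List.sorted (l.map (fun p => (K p.1, p.2))) (fun p => p.1) false).Pairwise
      (fun a b => a.1 ≤ b.1) := PySem.List.sorted_pairwise _ _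
  rw [pv_group_spec _ hpair, pv_keys_eq]
  have hmap : (l.map (fun p => (K p.1, p.2))).map Prod.fst = l.map (fun p => K p.1) := by simp
  have hperm : (PySem.List.sorted (l.map (fun p => (K p.1, p.2))) (fun p => p.1) false).Perm
      (l.map (fun p => (K p.1, p.2))) := PySem.List.sorted_perm _ _ _
  have hpermSet :
      (PySem.Set.ofList ((PySem.List.sorted (l.map (fun p => (K p.1, p.2))) (fun p => p.1) false).map Prod.fst)).Perm
        (PySem.Set.ofList (l.map (fun p => K p.1))) := by
    refine (List.perm_ext_iff_of_nodup (PySem.Set.nodup_ofList _) (PySem.Set.nodup_ofList _)).mpr ?_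
    intro a
    rw [PySem.Set.mem_ofList _ _, PySem.Set.mem_ofList _ _, ← hmap]
    exact (hperm.map Prod.fst).mem_iff
  have hlt : (PySem.Set.ofList ((PySem.List.sorted (l.map (fun p => (K p.1, p.2))) (fun p => p.1) false).map Prod.fst)).Pairwise (· < ·) := by
    have h1 : ((PySem.List.sorted (l.map (fun p => (K p.1, p.2))) (fun p => p.1) false).map Prod.fst).Pairwise (· ≤ ·) :=
      List.pairwise_map.mpr hpair
    exact ((h1.sublist (pv_ofList_sublist _)).and (PySem.Set.nodup_ofList _)).imp
      (fun h => lt_of_le_of_ne h.1 h.2)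
  have hkeys : PySem.List.sorted (PySem.Set.ofList (l.map (fun p => K p.1))) (fun x => x) false
      = PySem.Set.ofList ((PySem.List.sorted (l.map (fun p => (K p.1, p.2))) (fun p => p.1) false).map Prod.fst) :=
    PySem.List.sorted_eq_of_perm_of_pairwise_lt _ _ _ hpermSet hlt
  rw [hkeys]
  refine Prod.ext rfl ?_
  refine List.map_congr_left (fun c _ => ?_)
  rw [pv_getD_eq, pv_filter_sorted]

-- ===== VERDICT (by name: the statement is the Claim_ definition above) =====
theorem bin_time_series_py_spec : Claim_equal_bin_time_series_py := by
  intro dates data binsize start_date _ _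
  unfold Spec_bin_time_series_py bin_time_series_py bin_time_series_py_alt
  exact pv_main
    (fun d => start_date.getD ((PySem.List.pyGet? dates 0).getD 0)
      + (PySem.Int.floordiv |d - start_date.getD ((PySem.List.pyGet? dates 0).getD 0)| binsize) * binsize)
    (dates.zip data)
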